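-- pv_equiv track=rewrite | github.com/wilmurillo-ai/Design-Assistant | .skills/openclaw-skills/skills/eamonnn101/hexalotto/scripts/hexalotto.py | _build_mark6_year_table
-- ===== SOURCE A (Python) =====
-- SHENG_XIAO = ['鼠', '牛', '虎', '兔', '龙', '蛇', '马', '羊', '猴', '鸡', '狗', '猪']
--
-- def _build_mark6_year_table(year):
--     """动态生成六合彩某年的生肖号码对照表(1-49)"""
--     tai_sui_idx = (year - 4) % 12
--     table = {}
--     for num in range(1, 50):
--         xiao_idx = (tai_sui_idx - (num - 1)) % 12
--         xiao = SHENG_XIAO[xiao_idx]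
--         table.setdefault(xiao, []).append(num)
--     return table
-- ===== SOURCE B (Python) =====
-- SHENG_XIAO = ['鼠', '牛', '虎', '兔', '龙', '蛇', '马', '羊', '猴', '鸡', '狗', '猪']
--
-- def _build_mark6_year_table(year):
--     """Zip the reversed rotation of the zodiac list with arithmetic-progression buckets."""
--     t = (year - 4) % 12
--     keys = (SHENG_XIAO[t + 1:] + SHENG_XIAO[:t + 1])[::-1]
--     buckets = [list(range(off + 1, 50, 12)) for off in range(12)]
--     return dict(zip(keys, buckets))
-- ===== Notes on version B (the rewrite author's own statement) =====
-- stated objective: simpler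
-- what changed: B never buckets per ball number: it slices-and-reverses the zodiac list to get the key order and zips it with precomputed per-offset arithmetic-progression ranges, instead of scattering every ball number into setdefault lists.
import Mathlib
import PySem

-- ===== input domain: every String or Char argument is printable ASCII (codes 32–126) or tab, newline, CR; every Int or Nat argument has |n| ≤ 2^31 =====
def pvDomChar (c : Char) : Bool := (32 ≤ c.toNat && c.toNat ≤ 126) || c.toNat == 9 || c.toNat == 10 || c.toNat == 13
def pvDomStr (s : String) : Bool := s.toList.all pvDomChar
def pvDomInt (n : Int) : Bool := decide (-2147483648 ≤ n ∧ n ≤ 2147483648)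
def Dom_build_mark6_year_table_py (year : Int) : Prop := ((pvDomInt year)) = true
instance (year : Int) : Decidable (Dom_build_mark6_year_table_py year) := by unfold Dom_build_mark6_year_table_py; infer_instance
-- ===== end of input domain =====

-- B zips the reversed rotation of the zodiac list with per-offset arithmetic-progression
-- buckets instead of scattering each ball number into setdefault lists (objective: simpler).


-- ===== PORT A =====
def shengXiao : List String := ["鼠", "牛", "虎", "兔", "龙", "蛇", "马", "羊", "猴", "鸡", "狗", "猪"]

-- A: per-number bucketing via setdefault(...).append over num = 1..49.
-- SHENG_XIAO[xiao_idx] is ported with pyGet?; the index (a mod by the list length) is always in range,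
-- so the .getD "" default is never taken.
def build_mark6_year_table_py (year : Int) : List (String × List Int) :=
  let tai_sui_idx := PySem.Int.mod (year - 4) 12
  ((PySem.List.pyRange 1 50 1).foldl
      (fun (table : PySem.Dict String (List Int)) num =>
        let xiao_idx := PySem.Int.mod (tai_sui_idx - (num - 1)) 12
        let xiao := (PySem.List.pyGet? shengXiao xiao_idx).getD ""
        table.insert xiao (table.getD xiao [] ++ [num]))
      PySem.Dict.empty).items

-- ===== PORT B =====
-- B: keys = reversed rotation of the zodiac list (two slices, then [::-1] via slice?,
-- exact per PYSEM); buckets = one range per offset; result = dict(zip(keys, buckets)).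
def build_mark6_year_table_py_alt (year : Int) : List (String × List Int) :=
  let t := PySem.Int.mod (year - 4) 12
  let keys := ((PySem.List.slice? (PySem.List.slice shengXiao (some (t + 1)) none ++
      PySem.List.slice shengXiao none (some (t + 1))) none none (-1)).getD [])
  let buckets := (PySem.List.pyRange 0 12 1).map (fun off => PySem.List.pyRange (off + 1) 50 12)
  ((keys.zip buckets).foldl (fun (d : PySem.Dict String (List Int)) p => d.insert p.1 p.2)
      PySem.Dict.empty).items

-- ===== PRECONDITION & SPEC =====
def Spec_build_mark6_year_table_py (year : Int) (out : List (String × List Int)) : Prop := out = build_mark6_year_table_py_alt year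
instance (year : Int) (out : List (String × List Int)) : Decidable (Spec_build_mark6_year_table_py year out) := by unfold Spec_build_mark6_year_table_py; infer_instance

-- ===== CLAIM =====
def Claim_equal_build_mark6_year_table_py : Prop := ∀ (year : Int), Dom_build_mark6_year_table_py year → Spec_build_mark6_year_table_py year (build_mark6_year_table_py year)

-- ===== LEMMAS AND PROOFS =====
-- Both ports depend on year only through t := (year - 4) % 12 ∈ [0, 12); these helpers make
-- that dependence explicit so the 12 cases can be checked by decide.
def coreA (t : Int) : List (String × List Int) :=
  ((PySem.List.pyRange 1 50 1).foldl
      (fun (table : PySem.Dict String (List Int)) num =>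
        let xiao_idx := PySem.Int.mod (t - (num - 1)) 12
        let xiao := (PySem.List.pyGet? shengXiao xiao_idx).getD ""
        table.insert xiao (table.getD xiao [] ++ [num]))
      PySem.Dict.empty).items

def coreB (t : Int) : List (String × List Int) :=
  let keys := ((PySem.List.slice? (PySem.List.slice shengXiao (some (t + 1)) none ++
      PySem.List.slice shengXiao none (some (t + 1))) none none (-1)).getD [])
  let buckets := (PySem.List.pyRange 0 12 1).map (fun off => PySem.List.pyRange (off + 1) 50 12)
  ((keys.zip buckets).foldl (fun (d : PySem.Dict String (List Int)) p => d.insert p.1 p.2)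
      PySem.Dict.empty).items

set_option maxRecDepth 40000 in
theorem core_eq : ∀ t ∈ PySem.List.pyRange 0 12 1, coreA t = coreB t := by decide

-- ===== VERDICT =====
theorem build_mark6_year_table_py_spec : Claim_equal_build_mark6_year_table_py := by
  intro year _
  show build_mark6_year_table_py year = build_mark6_year_table_py_alt year
  have hA : build_mark6_year_table_py year = coreA (PySem.Int.mod (year - 4) 12) := rfl
  have hB : build_mark6_year_table_py_alt year = coreB (PySem.Int.mod (year - 4) 12) := rfl
  rw [hA, hB]
  apply core_eq
  rw [PySem.List.mem_pyRange_one, PySem.Int.mod_eq_emod_of_pos (b := 12) (by norm_num)]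
  exact ⟨Int.emod_nonneg _ (by norm_num), Int.emod_lt_of_pos _ (by norm_num)⟩
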